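-- pv_equiv track=rewrite | github.com/MalteHB/language_analytics_cds | src/collocation.py | disjoint_frequency
-- ===== SOURCE A (Python) =====
-- def disjoint_frequency(tokenized_text, keyword, collocate, window_size):
--
--     disjoint_frequency = 0
--
--     for i, word in enumerate(tokenized_text):
--
--         if word == keyword:
--
--             left_window = tokenized_text[max(0, i - window_size):i]
--
--             right_window = tokenized_text[i:(i + window_size + 1)]
--
--             total_window = left_window + right_window
--
--             if keyword in total_window and collocate not in total_window:
--
--                 disjoint_frequency += 1
--
--     return disjoint_frequency
-- ===== SOURCE B (Python) =====
-- def disjoint_frequency(tokenized_text, keyword, collocate, window_size):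
--     # A negative window is empty: no occurrence can be counted.
--     if window_size < 0:
--         return 0
--     collocate_positions = [i for i, word in enumerate(tokenized_text)
--                            if word == collocate]
--     count = 0
--     for i, word in enumerate(tokenized_text):
--         if word == keyword and not any(
--                 i - window_size <= p <= i + window_size
--                 for p in collocate_positions):
--             count += 1
--     return count
-- ===== Notes on version B (the rewrite author's own statement) =====
-- stated objective: alternative
-- what changed: B never builds the per-occurrence window slices: it precomputes the list of collocate positions once and decides each keyword occurrence by an arithmetic range test against those positions (the keyword-in-window test, always true for a nonnegative window, disappears).
-- intended difference: For negative window_size whose slice stop i+window_size+1 falls below zero, Python's negative-index wraparound gives A a spurious non-empty window, so A returns a positive count when some such window holds a keyword but no collocate; B returns 0 there, the intended value since a negative window is empty. — e.g. on disjoint_frequency(["k", "x", "y"], "k", "c", -2): A returns 1, B returns 0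
import Mathlib
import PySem

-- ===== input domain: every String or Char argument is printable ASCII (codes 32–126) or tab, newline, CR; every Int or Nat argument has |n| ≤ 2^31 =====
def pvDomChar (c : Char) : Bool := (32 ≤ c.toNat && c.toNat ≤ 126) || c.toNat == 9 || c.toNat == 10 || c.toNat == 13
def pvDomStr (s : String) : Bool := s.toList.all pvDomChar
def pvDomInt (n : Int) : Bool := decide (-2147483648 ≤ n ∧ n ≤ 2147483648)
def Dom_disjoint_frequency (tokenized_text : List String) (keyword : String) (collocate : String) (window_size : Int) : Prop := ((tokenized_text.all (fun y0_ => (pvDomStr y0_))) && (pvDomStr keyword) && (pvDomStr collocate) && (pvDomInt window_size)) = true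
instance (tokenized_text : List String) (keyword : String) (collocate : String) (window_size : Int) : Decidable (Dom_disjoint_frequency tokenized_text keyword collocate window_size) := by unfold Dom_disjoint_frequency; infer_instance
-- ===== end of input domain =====

-- B replaces A's per-occurrence window slices by a once-precomputed list of collocate
-- positions tested with an arithmetic range check; for negative window sizes (where A's
-- slice bound wraps around) B returns 0, the intended value (stated as D_ below).


-- ===== PORT A =====
def disjoint_frequency (tokenized_text : List String) (keyword : String) (collocate : String) (window_size : Int) : Int :=
  (PySem.List.enumerate tokenized_text 0).foldl (fun acc p =>
    let i := p.1
    let word := p.2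
    if word = keyword then
      let left_window := PySem.List.slice tokenized_text (some (max 0 (i - window_size))) (some i)
      let right_window := PySem.List.slice tokenized_text (some i) (some (i + window_size + 1))
      let total_window := left_window ++ right_window
      if keyword ∈ total_window ∧ collocate ∉ total_window then acc + 1 else acc
    else acc) 0

-- ===== PORT B =====
def disjoint_frequency_alt (tokenized_text : List String) (keyword : String) (collocate : String) (window_size : Int) : Int :=
  if window_size < 0 then 0
  else
    let collocate_positions := ((PySem.List.enumerate tokenized_text 0).filter (fun p => p.2 == collocate)).map (·.1)
    (PySem.List.enumerate tokenized_text 0).foldl (fun acc p =>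
      if p.2 = keyword ∧ ¬ (collocate_positions.any
            (fun q => decide (p.1 - window_size ≤ q ∧ q ≤ p.1 + window_size)) = true)
      then acc + 1 else acc) 0

-- ===== PRECONDITION & SPEC =====
-- For negative window_size whose slice stop i+window_size+1 falls below zero, Python's
-- negative-index wraparound gives A a spurious non-empty window, so A returns a positive
-- count when some such window holds a keyword but no collocate; B returns 0 there, the
-- intended value since a negative window is empty.
def D_disjoint_frequency (tokenized_text : List String) (keyword : String) (collocate : String) (window_size : Int) : Prop :=
  let m := (window_size + 1 + tokenized_text.length : Int).toNat
  0 < m ∧ ∃ k : Fin tokenized_text.length,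
    (k : Int) + window_size + 1 < 0 ∧ tokenized_text.get k = keyword ∧
    collocate ∉ (tokenized_text.drop k).take m
instance (tokenized_text : List String) (keyword : String) (collocate : String) (window_size : Int) : Decidable (D_disjoint_frequency tokenized_text keyword collocate window_size) := by unfold D_disjoint_frequency; infer_instance
def Spec_disjoint_frequency (tokenized_text : List String) (keyword : String) (collocate : String) (window_size : Int) (out : Int) : Prop := ¬ D_disjoint_frequency tokenized_text keyword collocate window_size → out = disjoint_frequency_alt tokenized_text keyword collocate window_size
instance (tokenized_text : List String) (keyword : String) (collocate : String) (window_size : Int) (out : Int) : Decidable (Spec_disjoint_frequency tokenized_text keyword collocate window_size out) := by unfold Spec_disjoint_frequency; infer_instance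
def pvDiffWitness_disjoint_frequency : List String × String × String × Int := (["k", "x", "y"], "k", "c", -2)
def pvDiffWitnessOut_disjoint_frequency : Int × Int := (1, 0)

-- ===== CLAIM (what is proved, stated in full; the proofs are below) =====
def Claim_unchanged_disjoint_frequency : Prop := ∀ (tokenized_text : List String) (keyword : String) (collocate : String) (window_size : Int), Dom_disjoint_frequency tokenized_text keyword collocate window_size → Spec_disjoint_frequency tokenized_text keyword collocate window_size (disjoint_frequency tokenized_text keyword collocate window_size)
def Claim_changed_disjoint_frequency : Prop := Dom_disjoint_frequency (pvDiffWitness_disjoint_frequency.1) (pvDiffWitness_disjoint_frequency.2.1) (pvDiffWitness_disjoint_frequency.2.2.1) (pvDiffWitness_disjoint_frequency.2.2.2) ∧ D_disjoint_frequency (pvDiffWitness_disjoint_frequency.1) (pvDiffWitness_disjoint_frequency.2.1) (pvDiffWitness_disjoint_frequency.2.2.1) (pvDiffWitness_disjoint_frequency.2.2.2) ∧ disjoint_frequency (pvDiffWitness_disjoint_frequency.1) (pvDiffWitness_disjoint_frequency.2.1) (pvDiffWitness_disjoint_frequency.2.2.1) (pvDiffWitness_disjoint_frequency.2.2.2) =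 pvDiffWitnessOut_disjoint_frequency.1 ∧ disjoint_frequency_alt (pvDiffWitness_disjoint_frequency.1) (pvDiffWitness_disjoint_frequency.2.1) (pvDiffWitness_disjoint_frequency.2.2.1) (pvDiffWitness_disjoint_frequency.2.2.2) = pvDiffWitnessOut_disjoint_frequency.2 ∧ pvDiffWitnessOut_disjoint_frequency.1 ≠ pvDiffWitnessOut_disjoint_frequency.2
def Claim_exact_disjoint_frequency : Prop := ∀ (tokenized_text : List String) (keyword : String) (collocate : String) (window_size : Int), Dom_disjoint_frequency tokenized_text keyword collocate window_size → D_disjoint_frequency tokenized_text keyword collocate window_size → disjoint_frequency tokenized_text keyword collocate window_size ≠ disjoint_frequency_alt tokenized_text keyword collocate window_size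

-- ===== LEMMAS AND PROOFS =====

-- the total window A builds around index i
def pvTw (xs : List String) (w i : Int) : List String :=
  PySem.List.slice xs (some (max 0 (i - w))) (some i) ++ PySem.List.slice xs (some i) (some (i + w + 1))

-- membership in a drop/take segment, by index
lemma pv_mem_drop_take {α : Type} (xs : List α) (a m : Nat) (x : α) :
    x ∈ (xs.drop a).take m ↔ ∃ j, ∃ _ : j < xs.length, a ≤ j ∧ j < a + m ∧ xs[j] = x := by
  constructor
  · intro hx
    rcases List.mem_iff_getElem.mp hx with ⟨i, hi, hget⟩
    have hi' : i < m ∧ a + i < xs.length := by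
      simp [List.length_take, List.length_drop] at hi; omega
    refine ⟨a + i, hi'.2, by omega, by omega, ?_⟩
    simpa [List.getElem_take, List.getElem_drop] using hget
  · rintro ⟨j, hj, haj, hjm, hget⟩
    apply List.mem_iff_getElem.mpr
    refine ⟨j - a, by simp [List.length_take, List.length_drop]; omega, ?_⟩
    rw [List.getElem_take, List.getElem_drop]
    simpa [Nat.add_sub_cancel' haj] using hget

-- membership in the total window, by index (any window size)
lemma pv_mem_tw (xs : List String) (w : Int) (k : Nat) (hk : k < xs.length) (x : String) :
    x ∈ pvTw xs w (k : Int) ↔ ∃ j, ∃ _ : j < xs.length, xs[j] = x ∧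
      ((PySem.List.clampIdx xs.length (max 0 ((k : Int) - w)) ≤ j ∧ j < k) ∨
       (k ≤ j ∧ j < PySem.List.clampIdx xs.length ((k : Int) + w + 1))) := by
  have hsl : ∀ (a b : Int), PySem.List.slice xs (some a) (some b) =
      (xs.drop (PySem.List.clampIdx xs.length a)).take
        (PySem.List.clampIdx xs.length b - PySem.List.clampIdx xs.length a) := by
    intro a b; rfl
  have hclk : PySem.List.clampIdx xs.length (k : Int) = k := by
    simp only [PySem.List.clampIdx]; split_ifs <;> omega
  rw [pvTw, List.mem_append, hsl, hsl, hclk, pv_mem_drop_take, pv_mem_drop_take]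
  constructor
  · rintro (⟨j, hj, h1, h2, h3⟩ | ⟨j, hj, h1, h2, h3⟩)
    · exact ⟨j, hj, h3, Or.inl ⟨h1, by omega⟩⟩
    · exact ⟨j, hj, h3, Or.inr ⟨h1, by omega⟩⟩
  · rintro ⟨j, hj, h3, (⟨h1, h2⟩ | ⟨h1, h2⟩)⟩
    · exact Or.inl ⟨j, hj, h1, by omega, h3⟩
    · exact Or.inr ⟨j, hj, h1, by omega, h3⟩

-- nonnegative window: A's inner test says "no collocate within window_size of k"
lemma pv_tw_char_pos (xs : List String) (kw c : String) (w : Int) (k : Nat)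
    (hw : 0 ≤ w) (hk : k < xs.length) (hkey : xs[k] = kw) :
    (kw ∈ pvTw xs w (k : Int) ∧ c ∉ pvTw xs w (k : Int)) ↔
      ¬ ∃ j, ∃ _ : j < xs.length, xs[j] = c ∧
        (k : Int) - w ≤ (j : Int) ∧ (j : Int) ≤ (k : Int) + w := by
  have hkw : kw ∈ pvTw xs w (k : Int) := by
    rw [pv_mem_tw xs w k hk]
    refine ⟨k, hk, hkey, Or.inr ⟨le_refl _, ?_⟩⟩
    simp only [PySem.List.clampIdx]; split_ifs <;> omega
  simp only [hkw, true_and]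
  rw [pv_mem_tw xs w k hk]
  constructor
  · intro hc ⟨j, hj, hcj, h1, h2⟩
    apply hc
    refine ⟨j, hj, hcj, ?_⟩
    simp only [PySem.List.clampIdx]
    split_ifs <;> omega
  · intro hno ⟨j, hj, hcj, hor⟩
    apply hno
    refine ⟨j, hj, hcj, ?_⟩
    simp only [PySem.List.clampIdx] at hor
    split_ifs at hor <;> omega

-- negative window: A's inner test holds iff the wrapped window is non-empty and collocate-free
lemma pv_tw_char_neg (xs : List String) (kw c : String) (w : Int) (k : Nat)
    (hw : w < 0) (hk : k < xs.length) (hkey : xs[k] = kw) :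
    (kw ∈ pvTw xs w (k : Int) ∧ c ∉ pvTw xs w (k : Int)) ↔
      ((k : Int) + w + 1 < 0 ∧ 0 < (xs.length : Int) + w + 1 ∧
       c ∉ (xs.drop k).take ((xs.length : Int) + w + 1).toNat) := by
  rw [show (c ∉ pvTw xs w (k : Int)) = ¬ (c ∈ pvTw xs w (k : Int)) from rfl,
      pv_mem_tw xs w k hk, pv_mem_tw xs w k hk]
  constructor
  · rintro ⟨⟨j, hj, hget, hor⟩, hc⟩
    have hcl : (k : Int) + w + 1 < 0 ∧ 0 < (xs.length : Int) + w + 1 := by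
      simp only [PySem.List.clampIdx] at hor
      split_ifs at hor <;> omega
    refine ⟨hcl.1, hcl.2, ?_⟩
    rw [pv_mem_drop_take]
    rintro ⟨j', hj', h1, h2, hget'⟩
    refine hc ⟨j', hj', hget', Or.inr ⟨h1, ?_⟩⟩
    simp only [PySem.List.clampIdx]
    split_ifs <;> omega
  · rintro ⟨h1, h2, hno⟩
    rw [pv_mem_drop_take] at hno
    constructor
    · refine ⟨k, hk, hkey, Or.inr ⟨le_refl _, ?_⟩⟩
      simp only [PySem.List.clampIdx]
      split_ifs <;> omega
    · rintro ⟨j, hj, hget, hor⟩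
      apply hno
      have hr : k ≤ j ∧ j < k + ((xs.length : Int) + w + 1).toNat := by
        simp only [PySem.List.clampIdx] at hor
        split_ifs at hor <;> omega
      exact ⟨j, hj, hr.1, hr.2, hget⟩

-- membership in B's precomputed position list
lemma pv_mem_coll (xs : List String) (c : String) (q : Int) :
    q ∈ ((PySem.List.enumerate xs 0).filter (fun p => p.2 == c)).map (·.1) ↔
      ∃ j, ∃ _ : j < xs.length, xs[j] = c ∧ q = (j : Int) := by
  simp only [List.mem_map, List.mem_filter, PySem.List.mem_enumerate_iff]
  constructor
  · rintro ⟨p, ⟨⟨j, hj, hp⟩, hc⟩, hq⟩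
    subst hp
    simp only [beq_iff_eq] at hc
    exact ⟨j, hj, hc, by simpa using hq.symm⟩
  · rintro ⟨j, hj, hc, hq⟩
    exact ⟨((j : Int), xs[j]), ⟨⟨j, hj, by simp⟩, by simpa using hc⟩, by simp [hq]⟩

-- B's any-test, by index
lemma pv_any_coll (xs : List String) (c : String) (w : Int) (k : Nat) :
    (((PySem.List.enumerate xs 0).filter (fun p => p.2 == c)).map (·.1)).any
        (fun q => decide ((k : Int) - w ≤ q ∧ q ≤ (k : Int) + w)) = true ↔
      ∃ j, ∃ _ : j < xs.length, xs[j] = c ∧ (k : Int) - w ≤ (j : Int) ∧ (j : Int) ≤ (k : Int) + w := by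
  rw [List.any_eq_true]
  constructor
  · rintro ⟨q, hq, hb⟩
    rcases (pv_mem_coll xs c q).mp hq with ⟨j, hj, hc, rfl⟩
    simp only [decide_eq_true_eq] at hb
    exact ⟨j, hj, hc, hb.1, hb.2⟩
  · rintro ⟨j, hj, hc, h1, h2⟩
    exact ⟨(j : Int), (pv_mem_coll xs c (j : Int)).mpr ⟨j, hj, hc, rfl⟩, by simp [h1, h2]⟩

-- A's fold as a countP over the enumeration
lemma pv_A_eq_countP (xs : List String) (kw c : String) (w : Int) :
    disjoint_frequency xs kw c w =
      ((PySem.List.enumerate xs 0).countP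
        (fun p => decide (p.2 = kw ∧ (kw ∈ pvTw xs w p.1 ∧ c ∉ pvTw xs w p.1))) : Int) := by
  rw [disjoint_frequency,
      PySem.List.foldl_congr_mem _ _
        (fun acc p => if p.2 = kw ∧ (kw ∈ pvTw xs w p.1 ∧ c ∉ pvTw xs w p.1) then acc + 1 else acc) 0
        ?_]
  · rw [PySem.List.foldl_ite_add_one]; simp
  · intro acc p _
    by_cases h1 : p.2 = kw
    · simp [h1, pvTw]
    · simp [h1]

theorem disjoint_frequency_spec : Claim_unchanged_disjoint_frequency := by
  intro xs kw c w _ hnD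
  rw [pv_A_eq_countP]
  by_cases hw : w < 0
  · -- B returns 0; A's count predicate is everywhere false since ¬ D_
    rw [disjoint_frequency_alt, if_pos hw]
    have hcount : ((PySem.List.enumerate xs 0).countP
        (fun p => decide (p.2 = kw ∧ (kw ∈ pvTw xs w p.1 ∧ c ∉ pvTw xs w p.1)))) = 0 := by
      rw [List.countP_eq_zero]
      rintro p hp
      rcases (PySem.List.mem_enumerate_iff xs 0 p).mp hp with ⟨k, hk, rfl⟩
      simp only [zero_add, decide_eq_true_eq]
      rintro ⟨hkey, htw⟩
      rcases (pv_tw_char_neg xs kw c w k hw hk hkey).mp htw with ⟨h1, h2, hno⟩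
      refine hnD ⟨by omega, ⟨k, hk⟩, h1, by simpa using hkey, ?_⟩
      rw [show (w + 1 + (xs.length : Int)) = (xs.length : Int) + w + 1 by ring]
      simpa using hno
    rw [hcount]; rfl
  · -- same count on both sides
    rw [disjoint_frequency_alt, if_neg hw]
    rw [PySem.List.foldl_ite_add_one
          (fun p : Int × String => p.2 = kw ∧
            ¬ ((((PySem.List.enumerate xs 0).filter (fun p => p.2 == c)).map (·.1)).any
              (fun q => decide (p.1 - w ≤ q ∧ q ≤ p.1 + w)) = true))]
    rw [zero_add]
    congr 1
    apply List.countP_congr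
    intro p hp
    rcases (PySem.List.mem_enumerate_iff xs 0 p).mp hp with ⟨k, hk, rfl⟩
    simp only [zero_add, decide_eq_true_eq]
    by_cases hkey : xs[k] = kw
    · simp only [hkey, true_and]
      rw [pv_tw_char_pos xs kw c w k (not_lt.mp hw) hk hkey]
      exact (not_congr (pv_any_coll xs c w k)).symm
    · simp [hkey]

theorem disjoint_frequency_changed : Claim_changed_disjoint_frequency := by
  unfold Claim_changed_disjoint_frequency; decide

theorem disjoint_frequency_tight : Claim_exact_disjoint_frequency := by
  intro xs kw c w _ hD
  rcases hD with ⟨hm, ⟨⟨k, hk⟩, h1, hkey', hall'⟩⟩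
  have hkey : xs[k] = kw := by simpa using hkey'
  have hw : w < 0 := by omega
  have h2 : 0 < (xs.length : Int) + w + 1 := by omega
  have hall : c ∉ (xs.drop k).take ((xs.length : Int) + w + 1).toNat := by
    rw [show ((xs.length : Int) + w + 1) = w + 1 + xs.length by ring]
    simpa using hall'
  rw [pv_A_eq_countP, disjoint_frequency_alt, if_pos hw]
  have hpos : 0 < (PySem.List.enumerate xs 0).countP
      (fun p => decide (p.2 = kw ∧ (kw ∈ pvTw xs w p.1 ∧ c ∉ pvTw xs w p.1))) := by
    rw [List.countP_pos_iff]
    refine ⟨((k : Int), xs[k]), (PySem.List.mem_enumerate_iff xs 0 _).mpr ⟨k, hk, by simp⟩, ?_⟩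
    simp only [decide_eq_true_eq]
    exact ⟨hkey, (pv_tw_char_neg xs kw c w k hw hk hkey).mpr ⟨h1, h2, hall⟩⟩
  intro hEq
  omega
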